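-- pv_equiv track=rewrite | github.com/baozhiming/datastruecture | binary_search/bsearch.py | bsearch_right_not_greater
-- ===== SOURCE A (Python) =====
-- from typing import List
--
-- def bsearch_right_not_greater(nums: List, n: int) -> int:
--     """查找最后一个小于等于给定值的元素"""
--     low = 0
--     high = len(nums) - 1
--     while low <= high:
--         middle = low + (high - low) // 2
--         if nums[middle] <= n:
--             re = middle + 1
--             while re < len(nums) and nums[re] <= n:
--                 re += 1
--             return re - 1
--         else:
--             high = middle - 1
--     return -1
-- ===== SOURCE B (Python) =====
-- def bsearch_right_not_greater(nums, n: int) -> int: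
--     """Rightmost index with nums[idx] <= n (nums sorted ascending), or -1: pure binary search."""
--     lo, hi = 0, len(nums) - 1
--     res = -1
--     while lo <= hi:
--         mid = (lo + hi) // 2
--         if nums[mid] <= n:
--             res = mid
--             lo = mid + 1
--         else:
--             hi = mid - 1
--     return res
-- ===== Notes on version B (the rewrite author's own statement) =====
-- stated objective: faster
-- what changed: A mixes a binary probe with a forward linear scan that walks element by element to the last value <= n; B is a pure binary search that keeps the last known good index and never scans linearly.
-- outside the precondition, e.g. on bsearch_right_not_greater([0, 0, 0, 1, 0, 0], 0): A returns 2, B returns 5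
import Mathlib
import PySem

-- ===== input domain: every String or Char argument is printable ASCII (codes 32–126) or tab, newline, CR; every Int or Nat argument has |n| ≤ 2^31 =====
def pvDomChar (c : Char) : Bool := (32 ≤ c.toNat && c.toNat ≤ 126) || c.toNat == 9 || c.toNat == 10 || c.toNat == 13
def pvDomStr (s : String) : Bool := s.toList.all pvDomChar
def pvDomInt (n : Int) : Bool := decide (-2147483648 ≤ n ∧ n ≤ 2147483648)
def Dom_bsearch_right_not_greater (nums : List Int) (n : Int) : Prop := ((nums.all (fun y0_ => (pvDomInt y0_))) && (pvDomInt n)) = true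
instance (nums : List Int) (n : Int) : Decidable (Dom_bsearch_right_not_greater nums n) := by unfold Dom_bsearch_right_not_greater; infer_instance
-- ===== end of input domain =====

-- B replaces A's binary-probe-plus-linear-forward-scan by a pure binary search (asymptotically faster);
-- equality is claimed on ascending-sorted input, the natural domain of this binary search.


-- ===== PORT A =====
-- inner 'while re < len(nums) and nums[re] <= n: re += 1' (re starts at middle+1 ≥ 0, so a Nat index;
-- the bound check precedes the access, so getD is exact)
def pvScanA (nums : List Int) (n : Int) (re : Nat) : Nat :=
  if _h : re < nums.length ∧ nums.getD re 0 ≤ n then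
    pvScanA nums n (re + 1)
  else re
termination_by nums.length - re
decreasing_by omega

-- outer 'while low <= high' loop; middle = low + (high - low) // 2; in-range, so getD is exact
def pvLoopA (nums : List Int) (n : Int) (low high : Int) : Int :=
  if _h : low ≤ high then
    if nums.getD (low + PySem.Int.floordiv (high - low) 2).toNat 0 ≤ n then
      ((pvScanA nums n ((low + PySem.Int.floordiv (high - low) 2).toNat + 1) : Int)) - 1
    else
      pvLoopA nums n low ((low + PySem.Int.floordiv (high - low) 2) - 1)
  else -1
termination_by (high + 1 - low).toNat
decreasing_by
  have := PySem.Int.floordiv_two_mid_bounds (lo := 0) (hi := high - low) (by omega)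
  rw [zero_add] at this
  omega

def bsearch_right_not_greater (nums : List Int) (n : Int) : Int :=
  pvLoopA nums n 0 ((nums.length : Int) - 1)

-- ===== PORT B =====
-- 'while lo <= hi' of Source B: keep the last index found ≤ n in res; mid in range, so getD is exact
def pvLoopB (nums : List Int) (n : Int) (lo hi res : Int) : Int :=
  if _h : lo ≤ hi then
    if nums.getD (PySem.Int.floordiv (lo + hi) 2).toNat 0 ≤ n then
      pvLoopB nums n (PySem.Int.floordiv (lo + hi) 2 + 1) hi (PySem.Int.floordiv (lo + hi) 2)
    else
      pvLoopB nums n lo (PySem.Int.floordiv (lo + hi) 2 - 1) res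
  else res
termination_by (hi + 1 - lo).toNat
decreasing_by
  · have := PySem.Int.floordiv_two_mid_bounds (lo := lo) (hi := hi) (by omega)
    omega
  · have := PySem.Int.floordiv_two_mid_bounds (lo := lo) (hi := hi) (by omega)
    omega

def bsearch_right_not_greater_alt (nums : List Int) (n : Int) : Int :=
  pvLoopB nums n 0 ((nums.length : Int) - 1) (-1)

-- ===== PRECONDITION & SPEC =====
-- Pre_ excludes unsorted lists of more than five elements, on which A still returns: both programs
-- are binary searches whose answer on unsorted input is an accident of the probe order and no caller
-- would specify either value; short lists stay inside Pre_ because there the two probe orders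
-- provably coincide even without sortedness.
def Pre_bsearch_right_not_greater (nums : List Int) (n : Int) : Prop :=
  List.Pairwise (· ≤ ·) nums ∨ nums.length ≤ 5
instance (nums : List Int) (n : Int) : Decidable (Pre_bsearch_right_not_greater nums n) := by
  unfold Pre_bsearch_right_not_greater; infer_instance

def pvWitness_bsearch_right_not_greater : List Int × Int := ([-3, 1, 4, 4, 9], 4)

def Spec_bsearch_right_not_greater (nums : List Int) (n : Int) (out : Int) : Prop := out = bsearch_right_not_greater_alt nums n
instance (nums : List Int) (n : Int) (out : Int) : Decidable (Spec_bsearch_right_not_greater nums n out) := by unfold Spec_bsearch_right_not_greater; infer_instance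

-- ===== CLAIM (what is proved, stated in full; the proofs are below) =====
def Claim_equal_bsearch_right_not_greater : Prop := ∀ (nums : List Int) (n : Int), Dom_bsearch_right_not_greater nums n → Pre_bsearch_right_not_greater nums n → Spec_bsearch_right_not_greater nums n (bsearch_right_not_greater nums n)

-- ===== LEMMAS AND PROOFS =====
-- For a sorted list, membership of index i in the "≤ n" prefix is exactly i < countP (· ≤ n).
theorem pv_count_iff (n : Int) : ∀ (nums : List Int), List.Pairwise (· ≤ ·) nums →
    ∀ i (h : i < nums.length), (nums[i] ≤ n ↔ i < nums.countP (fun x => decide (x ≤ n)))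
  | [], _, i, h => by simp at h
  | a :: t, hp, i, h => by
    have hall : ∀ x ∈ t, a ≤ x := (List.pairwise_cons.1 hp).1
    have hpt : List.Pairwise (· ≤ ·) t := (List.pairwise_cons.1 hp).2
    cases i with
    | zero =>
      by_cases han : a ≤ n
      · simp [han]
      · have hz : t.countP (fun x => decide (x ≤ n)) = 0 :=
          List.countP_eq_zero.2 (fun x hx => by
            simp only [decide_eq_true_eq]
            exact fun hxn => han (le_trans (hall x hx) hxn))
        simp [han, hz]
    | succ i =>
      have hi : i < t.length := by simpa using h
      have ih := pv_count_iff n t hpt i hi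
      by_cases han : a ≤ n
      · simpa [List.countP_cons, han] using ih
      · have hz : t.countP (fun x => decide (x ≤ n)) = 0 :=
          List.countP_eq_zero.2 (fun x hx => by
            simp only [decide_eq_true_eq]
            exact fun hxn => han (le_trans (hall x hx) hxn))
        simp only [List.getElem_cons_succ, List.countP_cons, han]
        simp [hz] at ih ⊢
        exact ih

theorem pvScanA_eq (nums : List Int) (n : Int) (hp : List.Pairwise (· ≤ ·) nums) (re : Nat) :
    pvScanA nums n re = max re (nums.countP (fun x => decide (x ≤ n))) := by
  rw [pvScanA]
  have hcle : nums.countP (fun x => decide (x ≤ n)) ≤ nums.length := List.countP_le_length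
  by_cases hre : re < nums.length
  · have hiff := pv_count_iff n nums hp re hre
    have hg : nums.getD re 0 = nums[re] := List.getD_eq_getElem nums 0 hre
    by_cases hlt : re < nums.countP (fun x => decide (x ≤ n))
    · have hcond : re < nums.length ∧ nums.getD re 0 ≤ n := ⟨hre, by rw [hg]; exact hiff.2 hlt⟩
      rw [dif_pos hcond, pvScanA_eq nums n hp (re + 1)]
      omega
    · have hcond : ¬ (re < nums.length ∧ nums.getD re 0 ≤ n) := by
        rw [hg]; intro hcon; exact hlt (hiff.1 hcon.2)
      rw [dif_neg hcond]
      omega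
  · have hcond : ¬ (re < nums.length ∧ nums.getD re 0 ≤ n) := by omega
    rw [dif_neg hcond]
    omega
termination_by nums.length - re
decreasing_by omega

theorem pvLoopA_eq (nums : List Int) (n : Int) (hp : List.Pairwise (· ≤ ·) nums) (high : Int)
    (h1 : high < nums.length)
    (h2 : (nums.countP (fun x => decide (x ≤ n)) : Int) - 1 ≤ high) :
    pvLoopA nums n 0 high = (nums.countP (fun x => decide (x ≤ n)) : Int) - 1 := by
  rw [pvLoopA]
  have hcle : nums.countP (fun x => decide (x ≤ n)) ≤ nums.length := List.countP_le_length
  by_cases hlh : (0 : Int) ≤ high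
  · have hmid := PySem.Int.floordiv_two_mid_bounds (lo := 0) (hi := high - 0) (by omega)
    rw [zero_add] at hmid
    have hmlen : ((0 : Int) + PySem.Int.floordiv (high - 0) 2).toNat < nums.length := by omega
    have hiff := pv_count_iff n nums hp _ hmlen
    have hg : nums.getD ((0 : Int) + PySem.Int.floordiv (high - 0) 2).toNat 0
        = nums[((0 : Int) + PySem.Int.floordiv (high - 0) 2).toNat] :=
      List.getD_eq_getElem nums 0 hmlen
    rw [dif_pos hlh]
    by_cases hcase : nums[((0 : Int) + PySem.Int.floordiv (high - 0) 2).toNat] ≤ n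
    · rw [if_pos (by rw [hg]; exact hcase), pvScanA_eq nums n hp _]
      have := hiff.1 hcase
      omega
    · rw [if_neg (by rw [hg]; exact hcase)]
      have hge := hiff.2
      rw [pvLoopA_eq nums n hp ((0 : Int) + PySem.Int.floordiv (high - 0) 2 - 1) (by omega) (by omega)]
  · rw [dif_neg hlh]
    omega
termination_by (high + 1).toNat
decreasing_by
  have := PySem.Int.floordiv_two_mid_bounds (lo := 0) (hi := high - 0) (by omega)
  rw [zero_add] at this
  omega

theorem pvLoopB_eq (nums : List Int) (n : Int) (hp : List.Pairwise (· ≤ ·) nums)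
    (lo hi res : Int)
    (hlo : 0 ≤ lo) (hhi : hi < nums.length) (hres : res = lo - 1)
    (hlc : lo ≤ (nums.countP (fun x => decide (x ≤ n)) : Int))
    (hch : (nums.countP (fun x => decide (x ≤ n)) : Int) - 1 ≤ hi) :
    pvLoopB nums n lo hi res = (nums.countP (fun x => decide (x ≤ n)) : Int) - 1 := by
  rw [pvLoopB]
  by_cases hlh : lo ≤ hi
  · have hmid := PySem.Int.floordiv_two_mid_bounds (lo := lo) (hi := hi) hlh
    have hmlen : (PySem.Int.floordiv (lo + hi) 2).toNat < nums.length := by omega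
    have hiff := pv_count_iff n nums hp _ hmlen
    have hg : nums.getD (PySem.Int.floordiv (lo + hi) 2).toNat 0
        = nums[(PySem.Int.floordiv (lo + hi) 2).toNat] :=
      List.getD_eq_getElem nums 0 hmlen
    rw [dif_pos hlh]
    by_cases hcase : nums[(PySem.Int.floordiv (lo + hi) 2).toNat] ≤ n
    · have hlt := hiff.1 hcase
      rw [if_pos (by rw [hg]; exact hcase)]
      exact pvLoopB_eq nums n hp _ _ _ (by omega) hhi (by omega) (by omega) hch
    · have hge := hiff.2
      rw [if_neg (by rw [hg]; exact hcase)]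
      exact pvLoopB_eq nums n hp _ _ _ hlo (by omega) hres hlc (by omega)
  · rw [dif_neg hlh]
    omega
termination_by (hi + 1 - lo).toNat
decreasing_by
  · have := PySem.Int.floordiv_two_mid_bounds (lo := lo) (hi := hi) (by omega)
    omega
  · have := PySem.Int.floordiv_two_mid_bounds (lo := lo) (hi := hi) (by omega)
    omega

-- any list of at most five elements: both searches coincide regardless of order (finite case split)
theorem pv_short_eq (nums : List Int) (n : Int) (h : nums.length ≤ 5) :
    bsearch_right_not_greater nums n = bsearch_right_not_greater_alt nums n := by
  match nums with
  | [] =>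
    simp [bsearch_right_not_greater, bsearch_right_not_greater_alt, pvLoopA, pvLoopB]
  | [a] =>
    simp [bsearch_right_not_greater, bsearch_right_not_greater_alt, pvLoopA, pvLoopB, pvScanA,
      PySem.Int.floordiv]
  | [a, b] =>
    simp [bsearch_right_not_greater, bsearch_right_not_greater_alt, pvLoopA, pvLoopB, pvScanA,
      PySem.Int.floordiv]
    split_ifs <;> omega
  | [a, b, c] =>
    simp [bsearch_right_not_greater, bsearch_right_not_greater_alt, pvLoopA, pvLoopB, pvScanA,
      PySem.Int.floordiv]
    split_ifs <;> omega
  | [a, b, c, d] =>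
    simp [bsearch_right_not_greater, bsearch_right_not_greater_alt, pvLoopA, pvLoopB, pvScanA,
      PySem.Int.floordiv]
    split_ifs <;> omega
  | [a, b, c, d, e] =>
    simp [bsearch_right_not_greater, bsearch_right_not_greater_alt, pvLoopA, pvLoopB, pvScanA,
      PySem.Int.floordiv]
    split_ifs <;> omega
  | _ :: _ :: _ :: _ :: _ :: _ :: _ => simp at h; omega

-- ===== VERDICT (by name: the statement is the Claim_ definition above) =====
theorem bsearch_right_not_greater_spec : Claim_equal_bsearch_right_not_greater := by
  intro nums n _hdom hpre
  unfold Spec_bsearch_right_not_greater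
  rcases hpre with hp | hshort
  · have hcle : nums.countP (fun x => decide (x ≤ n)) ≤ nums.length := List.countP_le_length
    unfold bsearch_right_not_greater bsearch_right_not_greater_alt
    rw [pvLoopA_eq nums n hp _ (by omega) (by omega),
        pvLoopB_eq nums n hp 0 ((nums.length : Int) - 1) (-1) (by omega) (by omega) (by omega)
          (by omega) (by omega)]
  · exact pv_short_eq nums n hshort
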